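-- pv_equiv track=rewrite | github.com/Duxy1996/Advent-of-code-2017 | Day12/ej1.py | problem_one_algo
-- ===== SOURCE A (Python) =====
-- def problem_one_algo(pipes):
--   came_from = [0]
--   len_ant = 0;
--   while(len_ant != len(came_from)):
--     len_ant = len(came_from)
--     for pipe in pipes:
--       if pipe[0] in came_from:
--         came_from = came_from + pipe[1]
--     came_from = list(set(came_from))
--   return len(set(came_from))
-- ===== SOURCE B (Python) =====
-- def problem_one_algo(pipes):
--     adj = {}
--     for src, dsts in pipes:
--         adj.setdefault(src, []).extend(dsts)
--     visited = {0}
--     stack = [0]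
--     while stack:
--         u = stack.pop()
--         for v in adj.get(u, []):
--             if v not in visited:
--                 visited.add(v)
--                 stack.append(v)
--     return len(visited)
-- ===== Notes on version B (the rewrite author's own statement) =====
-- stated objective: alternative
-- what changed: Replaced the repeated whole-list fixpoint sweeps over all pipes (rescanning until the reachable set's size stabilises) by a single adjacency-dict build plus an iterative DFS from node 0 with a visited set.
import Mathlib
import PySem

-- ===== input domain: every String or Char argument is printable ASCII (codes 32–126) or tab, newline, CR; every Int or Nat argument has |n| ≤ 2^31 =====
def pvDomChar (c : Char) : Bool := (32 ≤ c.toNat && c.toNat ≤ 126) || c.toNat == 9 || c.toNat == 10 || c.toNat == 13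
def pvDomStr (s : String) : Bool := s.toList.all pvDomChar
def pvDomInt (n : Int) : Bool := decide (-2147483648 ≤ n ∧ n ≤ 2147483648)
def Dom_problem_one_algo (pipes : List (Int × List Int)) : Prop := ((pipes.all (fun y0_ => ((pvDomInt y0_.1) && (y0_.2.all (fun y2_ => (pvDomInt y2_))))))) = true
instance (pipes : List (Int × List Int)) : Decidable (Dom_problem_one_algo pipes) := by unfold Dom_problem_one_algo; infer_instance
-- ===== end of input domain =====

-- B replaces A's repeated full-list fixpoint sweeps by an adjacency dict built once plus an
-- iterative DFS from node 0 with a visited set (objective: alternative algorithm, same result).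

-- ===== PORT A =====
-- one 'for pipe in pipes' pass of A's while-body
def pvStepA (pipes : List (Int × List Int)) (came : List Int) : List Int :=
  pipes.foldl (fun acc pipe => if pipe.1 ∈ acc then acc ++ pipe.2 else acc) came

-- A's while loop; the fuel argument only makes the recursion total (proved never to run out
-- for the fuel problem_one_algo supplies), each fuel step is exactly one Python iteration
def pvLoopA (pipes : List (Int × List Int)) : Nat → List Int → Int → List Int
  | 0, came, _ => came
  | fuel + 1, came, len_ant =>
      if len_ant = (came.length : Int) then came
      else pvLoopA pipes fuel (PySem.Set.ofList (pvStepA pipes came)) (came.length : Int)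

def problem_one_algo (pipes : List (Int × List Int)) : Int :=
  ((PySem.Set.ofList
      (pvLoopA pipes ((pipes.flatMap (fun p => p.2)).length + 2) [0] 0)).length : Int)

-- ===== PORT B =====
-- adj: merged adjacency dict (setdefault(src, []).extend(dsts))
def pvAdj (pipes : List (Int × List Int)) : PySem.Dict Int (List Int) :=
  pipes.foldl (fun d p => d.insert p.1 (d.getD p.1 [] ++ p.2)) PySem.Dict.empty

-- DFS loop of Source B; the stack is kept top-first (Python's list end = our head), the fuel
-- argument only makes the recursion total (proved never to run out for the supplied fuel)
-- body of the inner 'for v in adj.get(u, [])' loop: state (visited, stack)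
def pvDfsStep (p : List Int × List Int) (v : Int) : List Int × List Int :=
  if v ∈ p.1 then p else (PySem.Set.add p.1 v, v :: p.2)

def pvDfs (adj : PySem.Dict Int (List Int)) : Nat → List Int → List Int → List Int
  | 0, visited, _ => visited
  | _ + 1, visited, [] => visited
  | fuel + 1, visited, u :: rest =>
      let r := (adj.getD u []).foldl pvDfsStep (visited, rest)
      pvDfs adj fuel r.1 r.2

def problem_one_algo_alt (pipes : List (Int × List Int)) : Int :=
  ((pvDfs (pvAdj pipes) ((pipes.flatMap (fun p => p.2)).length + 2) [0] [0]).length : Int)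

-- ===== PRECONDITION & SPEC =====
def Spec_problem_one_algo (pipes : List (Int × List Int)) (out : Int) : Prop := out = problem_one_algo_alt pipes
instance (pipes : List (Int × List Int)) (out : Int) : Decidable (Spec_problem_one_algo pipes out) := by unfold Spec_problem_one_algo; infer_instance

-- ===== CLAIM (what is proved, stated in full; the proofs are below) =====
def Claim_equal_problem_one_algo : Prop := ∀ (pipes : List (Int × List Int)), Dom_problem_one_algo pipes → Spec_problem_one_algo pipes (problem_one_algo pipes)

-- ===== LEMMAS AND PROOFS =====

-- a set T ∋ 0 closed under the pipes relation; both results are characterised as the least such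
def pvClosed (pipes : List (Int × List Int)) (T : List Int) : Prop :=
  ∀ p ∈ pipes, p.1 ∈ T → ∀ v ∈ p.2, v ∈ T

def pvGood (pipes : List (Int × List Int)) (R : List Int) : Prop :=
  R.Nodup ∧ (0 : Int) ∈ R ∧ pvClosed pipes R ∧
    ∀ T : List Int, (0 : Int) ∈ T → pvClosed pipes T → ∀ x ∈ R, x ∈ T

-- the universe: every element a run can ever reach
def pvU (pipes : List (Int × List Int)) : List Int := 0 :: pipes.flatMap (fun p => p.2)

-- ---- A-side lemmas ----

theorem pvStepA_append : ∀ (l : List (Int × List Int)) (came : List Int),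
    ∃ rest, l.foldl (fun acc pipe => if pipe.1 ∈ acc then acc ++ pipe.2 else acc) came = came ++ rest
  | [], came => ⟨[], by simp⟩
  | p :: l, came => by
    simp only [List.foldl_cons]
    by_cases h : p.1 ∈ came
    · rw [if_pos h]
      obtain ⟨r, hr⟩ := pvStepA_append l (came ++ p.2)
      exact ⟨p.2 ++ r, by rw [hr, List.append_assoc]⟩
    · rw [if_neg h]; exact pvStepA_append l came

theorem pvStepA_mono (pipes : List (Int × List Int)) (came : List Int) :
    ∀ x ∈ came, x ∈ pvStepA pipes came := by
  obtain ⟨rest, h⟩ := pvStepA_append pipes came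
  intro x hx; unfold pvStepA; rw [h]; exact List.mem_append_left _ hx

theorem pvStepA_sub : ∀ (l : List (Int × List Int)) (came : List Int),
    ∀ x ∈ l.foldl (fun acc pipe => if pipe.1 ∈ acc then acc ++ pipe.2 else acc) came,
      x ∈ came ∨ x ∈ l.flatMap (fun p => p.2)
  | [], came => by simp
  | p :: l, came => by
    intro x hx
    simp only [List.foldl_cons] at hx
    by_cases h : p.1 ∈ came
    · rw [if_pos h] at hx
      rcases pvStepA_sub l (came ++ p.2) x hx with h2 | h2
      · rcases List.mem_append.1 h2 with h3 | h3
        · exact Or.inl h3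
        · exact Or.inr (by simp [List.mem_flatMap]; exact Or.inl h3)
      · exact Or.inr (by simp [List.mem_flatMap] at h2 ⊢; tauto)
    · rw [if_neg h] at hx
      rcases pvStepA_sub l came x hx with h2 | h2
      · exact Or.inl h2
      · exact Or.inr (by simp [List.mem_flatMap] at h2 ⊢; tauto)

theorem pvStepA_min : ∀ (l : List (Int × List Int)) (came T : List Int),
    (∀ x ∈ came, x ∈ T) → (∀ p ∈ l, p.1 ∈ T → ∀ v ∈ p.2, v ∈ T) →
    ∀ x ∈ l.foldl (fun acc pipe => if pipe.1 ∈ acc then acc ++ pipe.2 else acc) came, x ∈ T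
  | [], came, T => by intro hs _ x hx; exact hs x hx
  | p :: l, came, T => by
    intro hs hcl x hx
    simp only [List.foldl_cons] at hx
    by_cases h : p.1 ∈ came
    · rw [if_pos h] at hx
      refine pvStepA_min l (came ++ p.2) T ?_ (fun q hq => hcl q (List.mem_cons_of_mem _ hq)) x hx
      intro y hy
      rcases List.mem_append.1 hy with h2 | h2
      · exact hs y h2
      · exact hcl p List.mem_cons_self (hs _ h) y h2
    · rw [if_neg h] at hx
      exact pvStepA_min l came T hs (fun q hq => hcl q (List.mem_cons_of_mem _ hq)) x hx

theorem pvStepA_closed : ∀ (l : List (Int × List Int)) (came : List Int),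
    ∀ p ∈ l, p.1 ∈ came → ∀ v ∈ p.2,
      v ∈ l.foldl (fun acc pipe => if pipe.1 ∈ acc then acc ++ pipe.2 else acc) came
  | [], _ => by simp
  | q :: l, came => by
    intro p hp hpc v hv
    simp only [List.foldl_cons]
    rcases List.mem_cons.1 hp with rfl | hp2
    · rw [if_pos hpc]
      obtain ⟨r, hr⟩ := pvStepA_append l (came ++ p.2)
      rw [hr]
      exact List.mem_append_left _ (List.mem_append_right _ hv)
    · by_cases h : q.1 ∈ came
      · rw [if_pos h]
        exact pvStepA_closed l (came ++ q.2) p hp2 (List.mem_append_left _ hpc) v hv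
      · rw [if_neg h]
        exact pvStepA_closed l came p hp2 hpc v hv

theorem pvLoopA_main (pipes : List (Int × List Int)) :
    ∀ (fuel : Nat) (came : List Int) (len_ant : Int),
      came.Nodup → (0 : Int) ∈ came → (∀ x ∈ came, x ∈ pvU pipes) →
      (∀ T : List Int, (0 : Int) ∈ T → pvClosed pipes T → ∀ x ∈ came, x ∈ T) →
      (len_ant = (came.length : Int) → pvClosed pipes came) →
      (pvU pipes).length + 2 ≤ fuel + came.length →
      pvGood pipes (pvLoopA pipes fuel came len_ant) := by
  intro fuel
  induction fuel with
  | zero =>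
    intro came len_ant hn h0 hU hmin hstop hfuel
    exfalso
    have := (List.subperm_of_subset hn hU).length_le
    omega
  | succ f ih =>
    intro came len_ant hn h0 hU hmin hstop hfuel
    rw [pvLoopA]
    by_cases hlen : len_ant = (came.length : Int)
    · rw [if_pos hlen]
      exact ⟨hn, h0, hstop hlen, hmin⟩
    · rw [if_neg hlen]
      obtain ⟨rest, hrest⟩ := pvStepA_append pipes came
      have hrest' : pvStepA pipes came = came ++ rest := hrest
      set came' := PySem.Set.ofList (pvStepA pipes came) with hc'
      have hsplit : came' = came ++
          (PySem.Set.ofList rest).filter (fun y => !(PySem.Set.contains came y)) := by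
        rw [hc', hrest', PySem.Set.ofList_append, PySem.Set.update_eq_append_filter,
          PySem.Set.ofList_eq_self_of_nodup came hn]
      have hn' : came'.Nodup := PySem.Set.nodup_ofList _
      have hmem' : ∀ x : Int, x ∈ came' ↔ x ∈ pvStepA pipes came := by
        intro x; rw [hc']; exact PySem.Set.mem_ofList (xs := pvStepA pipes came) (y := x)
      have hsub : ∀ x ∈ came, x ∈ came' := fun x hx => (hmem' x).2 (pvStepA_mono pipes came x hx)
      have h0' : (0 : Int) ∈ came' := hsub 0 h0
      have hU' : ∀ x ∈ came', x ∈ pvU pipes := by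
        intro x hx
        rcases pvStepA_sub pipes came x ((hmem' x).1 hx) with h | h
        · exact hU x h
        · exact List.mem_cons_of_mem _ h
      have hmin' : ∀ T : List Int, (0 : Int) ∈ T → pvClosed pipes T → ∀ x ∈ came', x ∈ T := by
        intro T h0T hcT x hx
        exact pvStepA_min pipes came T (hmin T h0T hcT) hcT x ((hmem' x).1 hx)
      have hlensplit := congrArg List.length hsplit
      rw [List.length_append] at hlensplit
      have hstop' : (came.length : Int) = (came'.length : Int) → pvClosed pipes came' := by
        intro he
        have hlen2 : came'.length = came.length := by exact_mod_cast he.symm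
        have hfil0 : ((PySem.Set.ofList rest).filter
            (fun y => !(PySem.Set.contains came y))).length = 0 := by omega
        have hfix : came' = came := by
          rw [hsplit, List.length_eq_zero_iff.1 hfil0, List.append_nil]
        intro p hp hpc v hv
        have hv' : v ∈ pvStepA pipes came :=
          pvStepA_closed pipes came p hp (by rwa [hfix] at hpc) v hv
        exact (hmem' v).2 hv'
      by_cases hg : came'.length = came.length
      · have hle : came.length ≤ (pvU pipes).length := (List.subperm_of_subset hn hU).length_le
        obtain ⟨f', rfl⟩ : ∃ f', f = f' + 1 := ⟨f - 1, by omega⟩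
        rw [pvLoopA, if_pos (by exact_mod_cast hg.symm)]
        exact ⟨hn', h0', hstop' (by exact_mod_cast hg.symm), hmin'⟩
      · exact ih came' (came.length : Int) hn' h0' hU' hmin' hstop' (by omega)

-- ---- B-side lemmas ----

theorem pvAdjFold_getD : ∀ (l : List (Int × List Int)) (d : PySem.Dict Int (List Int)) (u : Int),
    (l.foldl (fun d p => d.insert p.1 (d.getD p.1 [] ++ p.2)) d).getD u []
      = d.getD u [] ++ (l.filter (fun p => p.1 == u)).flatMap (fun p => p.2)
  | [], d, u => by simp
  | p :: l, d, u => by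
    simp only [List.foldl_cons]
    rw [pvAdjFold_getD l _ u]
    by_cases h : p.1 = u
    · subst h
      rw [List.filter_cons_of_pos (by simp)]
      simp [PySem.Dict.getD, PySem.Dict.get?_insert_self]
    · rw [List.filter_cons_of_neg (by simp [h])]
      have : (d.insert p.1 (d.getD p.1 [] ++ p.2)).getD u [] = d.getD u [] := by
        simp [PySem.Dict.getD, PySem.Dict.get?_insert_of_ne d _ (Ne.symm h)]
      rw [this]

theorem pvAdj_getD (pipes : List (Int × List Int)) (u : Int) :
    (pvAdj pipes).getD u [] = (pipes.filter (fun p => p.1 == u)).flatMap (fun p => p.2) := by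
  unfold pvAdj
  rw [pvAdjFold_getD]
  rfl

theorem pvAdj_mem (pipes : List (Int × List Int)) (u v : Int) :
    v ∈ (pvAdj pipes).getD u [] ↔ ∃ p ∈ pipes, p.1 = u ∧ v ∈ p.2 := by
  rw [pvAdj_getD]
  simp [List.mem_flatMap, List.mem_filter]

-- all properties of one inner 'for v in adj.get(u, [])' pass, proved in one induction
theorem pvDfsFold_props : ∀ (ns vs st : List Int),
    (∀ x ∈ vs, x ∈ (ns.foldl pvDfsStep (vs, st)).1) ∧
    (vs.Nodup → (ns.foldl pvDfsStep (vs, st)).1.Nodup) ∧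
    (∀ x ∈ (ns.foldl pvDfsStep (vs, st)).1, x ∈ vs ∨ x ∈ ns) ∧
    (∀ x ∈ st, x ∈ (ns.foldl pvDfsStep (vs, st)).2) ∧
    (∀ x ∈ (ns.foldl pvDfsStep (vs, st)).2, x ∈ st ∨ x ∈ (ns.foldl pvDfsStep (vs, st)).1) ∧
    (∀ v ∈ ns, v ∈ (ns.foldl pvDfsStep (vs, st)).1) ∧
    (∀ x ∈ (ns.foldl pvDfsStep (vs, st)).1, x ∈ vs ∨ x ∈ (ns.foldl pvDfsStep (vs, st)).2) ∧
    ((ns.foldl pvDfsStep (vs, st)).1.length + st.length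
      = vs.length + (ns.foldl pvDfsStep (vs, st)).2.length)
  | [], vs, st =>
    ⟨fun _ h => h, fun h => h, fun x h => Or.inl h, fun _ h => h, fun x h => Or.inl h,
      by simp, fun x h => Or.inl h, rfl⟩
  | v0 :: ns, vs, st => by
    simp only [List.foldl_cons]
    by_cases hv : v0 ∈ vs
    · rw [show pvDfsStep (vs, st) v0 = (vs, st) by simp [pvDfsStep, hv]]
      obtain ⟨c1, c2, c3, c4, c5, c6, c7, c8⟩ := pvDfsFold_props ns vs st
      refine ⟨c1, c2, fun x hx => (c3 x hx).imp id (List.mem_cons_of_mem _), c4, c5, ?_, c7, c8⟩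
      intro v hvn
      rcases List.mem_cons.1 hvn with rfl | hvn
      · exact c1 v hv
      · exact c6 v hvn
    · rw [show pvDfsStep (vs, st) v0 = (vs ++ [v0], v0 :: st) by
        simp [pvDfsStep, hv]]
      obtain ⟨d1, d2, d3, d4, d5, d6, d7, d8⟩ := pvDfsFold_props ns (vs ++ [v0]) (v0 :: st)
      refine ⟨?_, ?_, ?_, ?_, ?_, ?_, ?_, ?_⟩
      · exact fun x hx => d1 x (List.mem_append_left _ hx)
      · intro hnd
        refine d2 (by
          rw [List.nodup_append]
          refine ⟨hnd, List.nodup_singleton _, ?_⟩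
          intro a ha b hb
          simp only [List.mem_singleton] at hb
          exact fun he => hv ((he.trans hb) ▸ ha))
      · intro x hx
        rcases d3 x hx with h | h
        · rcases List.mem_append.1 h with h2 | h2
          · exact Or.inl h2
          · exact Or.inr (List.mem_cons.2 (Or.inl (by simpa using h2)))
        · exact Or.inr (List.mem_cons_of_mem _ h)
      · exact fun x hx => d4 x (List.mem_cons_of_mem _ hx)
      · intro x hx
        rcases d5 x hx with h | h
        · rcases List.mem_cons.1 h with rfl | h2
          · exact Or.inr (d1 x (List.mem_append_right _ (by simp)))
          · exact Or.inl h2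
        · exact Or.inr h
      · intro v hvn
        rcases List.mem_cons.1 hvn with rfl | hvn
        · exact d1 v (List.mem_append_right _ (by simp))
        · exact d6 v hvn
      · intro x hx
        rcases d7 x hx with h | h
        · rcases List.mem_append.1 h with h2 | h2
          · exact Or.inl h2
          · exact Or.inr (d4 x (by simpa using List.mem_cons.2 (Or.inl (by simpa using h2))))
        · exact Or.inr h
      · have := d8
        simp at this ⊢
        omega

theorem pvClosed_of_nostack (pipes : List (Int × List Int)) (visited : List Int)
    (h : ∀ w ∈ visited, ∀ v ∈ (pvAdj pipes).getD w [], v ∈ visited) :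
    pvClosed pipes visited := by
  intro p hp hpc v hv
  exact h p.1 hpc v ((pvAdj_mem pipes p.1 v).2 ⟨p, hp, rfl, hv⟩)

theorem pvDfs_main (pipes : List (Int × List Int)) :
    ∀ (fuel : Nat) (visited stack : List Int),
      visited.Nodup → (0 : Int) ∈ visited → (∀ x ∈ visited, x ∈ pvU pipes) →
      (∀ x ∈ stack, x ∈ visited) →
      (∀ T : List Int, (0 : Int) ∈ T → pvClosed pipes T → ∀ x ∈ visited, x ∈ T) →
      (∀ w ∈ visited, w ∈ stack ∨ ∀ v ∈ (pvAdj pipes).getD w [], v ∈ visited) →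
      stack.length + (pvU pipes).length + 1 ≤ fuel + visited.length →
      pvGood pipes (pvDfs (pvAdj pipes) fuel visited stack) := by
  intro fuel
  induction fuel with
  | zero =>
    intro visited stack hn h0 hU hst hmin h6 hfuel
    cases stack with
    | nil =>
      refine ⟨hn, h0, pvClosed_of_nostack pipes visited ?_, hmin⟩
      intro w hw v hv
      rcases h6 w hw with hws | hcl
      · simp at hws
      · exact hcl v hv
    | cons u rest =>
      exfalso
      have := (List.subperm_of_subset hn hU).length_le
      simp only [List.length_cons] at hfuel
      omega
  | succ f ih =>
    intro visited stack hn h0 hU hst hmin h6 hfuel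
    cases stack with
    | nil =>
      refine ⟨hn, h0, pvClosed_of_nostack pipes visited ?_, hmin⟩
      intro w hw v hv
      rcases h6 w hw with hws | hcl
      · simp at hws
      · exact hcl v hv
    | cons u rest =>
      simp only [pvDfs]
      obtain ⟨c1, c2, c3, c4, c5, c6, c7, c8⟩ := pvDfsFold_props ((pvAdj pipes).getD u []) visited rest
      have hu : u ∈ visited := hst u List.mem_cons_self
      refine ih _ _ (c2 hn) (c1 0 h0) ?_ ?_ ?_ ?_ ?_
      · intro x hx
        rcases c3 x hx with h | h
        · exact hU x h
        · obtain ⟨p, hp, _, hxp⟩ := (pvAdj_mem pipes u x).1 h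
          exact List.mem_cons_of_mem _ (List.mem_flatMap.2 ⟨p, hp, hxp⟩)
      · intro x hx
        rcases c5 x hx with h | h
        · exact c1 x (hst x (List.mem_cons_of_mem _ h))
        · exact h
      · intro T h0T hcT x hx
        rcases c3 x hx with h | h
        · exact hmin T h0T hcT x h
        · obtain ⟨p, hp, hpu, hxp⟩ := (pvAdj_mem pipes u x).1 h
          exact hcT p hp (hpu ▸ hmin T h0T hcT u hu) x hxp
      · intro w hw
        by_cases hwv : w ∈ visited
        · rcases h6 w hwv with hws | hcl
          · rcases List.mem_cons.1 hws with rfl | hws2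
            · exact Or.inr (fun v hv => c6 v hv)
            · exact Or.inl (c4 w hws2)
          · exact Or.inr (fun v hv => c1 v (hcl v hv))
        · rcases c7 w hw with h | h
          · exact absurd h hwv
          · exact Or.inl h
      · simp only [List.length_cons] at hfuel
        omega

theorem pvGood_length_eq (pipes : List (Int × List Int)) (R S : List Int)
    (hR : pvGood pipes R) (hS : pvGood pipes S) : R.length = S.length := by
  obtain ⟨hn, h0, hc, hm⟩ := hR
  obtain ⟨hn', h0', hc', hm'⟩ := hS
  have : R.Perm S := (List.perm_ext_iff_of_nodup hn hn').2
    (fun x => ⟨fun hx => hm S h0' hc' x hx, fun hx => hm' R h0 hc x hx⟩)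
  exact this.length_eq

-- ===== VERDICT (by name: the statement is the Claim_ definition above) =====
theorem problem_one_algo_spec : Claim_equal_problem_one_algo := by
  intro pipes _
  show problem_one_algo pipes = problem_one_algo_alt pipes
  unfold problem_one_algo problem_one_algo_alt
  have hA : pvGood pipes
      (pvLoopA pipes ((pipes.flatMap (fun p => p.2)).length + 2) [0] 0) := by
    refine pvLoopA_main pipes _ [0] 0 (by simp) (by simp) ?_ ?_ ?_ ?_
    · intro x hx; simp only [List.mem_singleton] at hx; subst hx; exact List.mem_cons_self
    · intro T h0T _ x hx; simp only [List.mem_singleton] at hx; subst hx; exact h0T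
    · intro h; simp at h
    · simp [pvU]
  have hB : pvGood pipes
      (pvDfs (pvAdj pipes) ((pipes.flatMap (fun p => p.2)).length + 2) [0] [0]) := by
    refine pvDfs_main pipes _ [0] [0] (by simp) (by simp) ?_ (fun x hx => hx) ?_ ?_ ?_
    · intro x hx; simp only [List.mem_singleton] at hx; subst hx; exact List.mem_cons_self
    · intro T h0T _ x hx; simp only [List.mem_singleton] at hx; subst hx; exact h0T
    · intro w hw; exact Or.inl hw
    · simp [pvU]; omega
  rw [PySem.Set.ofList_eq_self_of_nodup _ hA.1]
  exact_mod_cast congrArg (fun n : Nat => (n : Int)) (pvGood_length_eq pipes _ _ hA hB)
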